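-- pv_equiv track=rewrite | github.com/lenaindelaforetmagique/ProjectEuler | Python/PE389.py | V_prod
-- ===== SOURCE A (Python) =====
-- def E_prod(listeE):
--     """ retourne la variance d'un produit de variables aléatoires indépendantes"""
--     if len(listeE)==1:
--         return listeE[0]
--     else:
--         return E_prod(listeE[:-1])*listeE[-1]
--
-- def V_prod(listeV, listeE):
--     """ Retourne la variance d'un produit de variables aléatoires:
--     mode recursif : dernier element de la liste fois la variance du reste de la liste"""
--     if len(listeV)==len(listeE)==1:
--         return listeV[0]
--     else:
--         resteV = listeV[:-1]
--         resteE = listeE[:-1]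
--         t1 = listeV[-1]*V_prod(resteV, resteE)
--         t2 = listeV[-1]*(E_prod(resteE))**2
--         t3 = V_prod(resteV, resteE)*(listeE[-1])**2
--         return t1 + t2 + t3
-- ===== SOURCE B (Python) =====
-- def V_prod(listeV, listeE):
--     # One forward pass: maintain V = variance of the product so far and
--     # E = expectation of the product so far; O(n) instead of A's O(2^n) recursion.
--     V = listeV[0]
--     E = listeE[0]
--     for v, e in zip(listeV[1:], listeE[1:]):
--         V = v * V + v * E * E + V * e * e
--         E = E * e
--     return V
-- ===== Notes on version B (the rewrite author's own statement) =====
-- stated objective: faster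
-- what changed: replaces A's exponential double recursion (V_prod re-computed twice per level plus a separate recursive E_prod) by a single forward pass maintaining the running variance V and expectation E
import Mathlib
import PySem

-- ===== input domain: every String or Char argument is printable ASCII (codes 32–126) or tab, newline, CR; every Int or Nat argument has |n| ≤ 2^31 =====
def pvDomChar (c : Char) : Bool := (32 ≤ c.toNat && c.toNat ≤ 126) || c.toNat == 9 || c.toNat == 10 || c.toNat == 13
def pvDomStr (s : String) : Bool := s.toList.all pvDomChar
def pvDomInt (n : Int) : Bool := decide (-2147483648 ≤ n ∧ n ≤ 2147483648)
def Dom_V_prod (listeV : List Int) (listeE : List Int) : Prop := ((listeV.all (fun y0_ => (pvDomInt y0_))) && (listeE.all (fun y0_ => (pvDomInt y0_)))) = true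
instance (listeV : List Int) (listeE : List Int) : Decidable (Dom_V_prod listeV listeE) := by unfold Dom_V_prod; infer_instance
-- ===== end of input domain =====

-- B replaces A's exponential double recursion by one forward pass keeping the running
-- variance and expectation (objective: faster, O(n) instead of O(2^n)).

-- ===== PORT A =====
-- helper E_prod, transliterated; the '= []' guard only makes the recursion total
-- (Python raises IndexError there; such inputs are outside Pre_V_prod)
def E_prod (listeE : List Int) : Int :=
  if listeE.length = 1 then (PySem.List.pyGet? listeE 0).getD 0
  else if listeE = [] then 0  -- totality guard: Python raises IndexError here
  else E_prod (PySem.List.slice listeE none (some (-1))) * (PySem.List.pyGet? listeE (-1)).getD 0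
termination_by listeE.length
decreasing_by
  simp only [PySem.List.slice_to_neg_one, List.length_dropLast]
  have := List.length_pos_of_ne_nil ‹listeE ≠ []›
  omega

def V_prod (listeV : List Int) (listeE : List Int) : Int :=
  if listeV.length = 1 ∧ listeE.length = 1 then (PySem.List.pyGet? listeV 0).getD 0
  else if listeV = [] then 0  -- totality guard: Python raises IndexError here
  else
    let resteV := PySem.List.slice listeV none (some (-1))
    let resteE := PySem.List.slice listeE none (some (-1))
    let t1 := (PySem.List.pyGet? listeV (-1)).getD 0 * V_prod resteV resteE
    let t2 := (PySem.List.pyGet? listeV (-1)).getD 0 * (E_prod resteE) ^ 2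
    let t3 := V_prod resteV resteE * ((PySem.List.pyGet? listeE (-1)).getD 0) ^ 2
    t1 + t2 + t3
termination_by listeV.length
decreasing_by
  all_goals
    simp only [PySem.List.slice_to_neg_one, List.length_dropLast]
    have := List.length_pos_of_ne_nil ‹listeV ≠ []›
    omega

-- ===== PORT B =====
def V_prod_alt (listeV : List Int) (listeE : List Int) : Int :=
  -- V = listeV[0]; E = listeE[0]  (IndexError on empty list is outside Pre_V_prod)
  let V0 : Int := (PySem.List.pyGet? listeV 0).getD 0
  let E0 : Int := (PySem.List.pyGet? listeE 0).getD 0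
  -- for v, e in zip(listeV[1:], listeE[1:]): V, E updated in one pass
  (((PySem.List.slice listeV (some 1) none).zip (PySem.List.slice listeE (some 1) none)).foldl
    (fun (s ve : Int × Int) => (ve.1 * s.1 + ve.1 * s.2 * s.2 + s.1 * ve.2 * ve.2, s.2 * ve.2))
    (V0, E0)).1

-- ===== PRECONDITION & SPEC =====
-- Pre_ excludes exactly the inputs where Python A raises IndexError:
-- lists of different lengths or empty lists (the recursion eventually indexes [] with [-1]).
def Pre_V_prod (listeV : List Int) (listeE : List Int) : Prop :=
  listeV.length = listeE.length ∧ listeV ≠ []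
instance (listeV : List Int) (listeE : List Int) : Decidable (Pre_V_prod listeV listeE) := by
  unfold Pre_V_prod; infer_instance
def pvWitness_V_prod : List Int × List Int := ([2, 3], [1, 4])

def Spec_V_prod (listeV : List Int) (listeE : List Int) (out : Int) : Prop := out = V_prod_alt listeV listeE
instance (listeV : List Int) (listeE : List Int) (out : Int) : Decidable (Spec_V_prod listeV listeE out) := by unfold Spec_V_prod; infer_instance

-- ===== CLAIM (what is proved, stated in full; the proofs are below) =====
def Claim_equal_V_prod : Prop := ∀ (listeV : List Int) (listeE : List Int), Dom_V_prod listeV listeE → Pre_V_prod listeV listeE → Spec_V_prod listeV listeE (V_prod listeV listeE)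

-- ===== LEMMAS AND PROOFS =====

/-- The loop body of B, as a named function (definitionally the lambda in `V_prod_alt`). -/
def stepB (s ve : Int × Int) : Int × Int :=
  (ve.1 * s.1 + ve.1 * s.2 * s.2 + s.1 * ve.2 * ve.2, s.2 * ve.2)

/-- The (V, E) pair B's loop has after the whole pass. -/
def pairB (lV lE : List Int) : Int × Int :=
  ((PySem.List.slice lV (some 1) none).zip (PySem.List.slice lE (some 1) none)).foldl stepB
    ((PySem.List.pyGet? lV 0).getD 0, (PySem.List.pyGet? lE 0).getD 0)

lemma alt_eq_pairB (lV lE : List Int) : V_prod_alt lV lE = (pairB lV lE).1 := rfl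

lemma pairB_snoc (x v y e : Int) (xs ys : List Int) (h : xs.length = ys.length) :
    pairB (x :: xs ++ [v]) (y :: ys ++ [e]) = stepB (pairB (x :: xs) (y :: ys)) (v, e) := by
  simp only [pairB, PySem.List.slice_from_one, List.cons_append, List.tail_cons,
    PySem.List.pyGet?_zero_cons, Option.getD_some]
  rw [List.zip_append h, List.foldl_append]
  simp

lemma main_invariant : ∀ (lV lE : List Int), lV.length = lE.length → lV ≠ [] →
    (V_prod lV lE, E_prod lE) = pairB lV lE := by
  intro lV
  induction lV using List.reverseRecOn with
  | nil => intro lE h hn; exact absurd rfl hn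
  | append_singleton xs v ih =>
    intro lE hl hn
    rcases List.eq_nil_or_concat lE with rfl | ⟨ys, e, rfl⟩
    · simp at hl
    · simp only [List.concat_eq_append] at hl ⊢
      have hxy : xs.length = ys.length := by
        simpa using hl
      cases xs with
      | nil =>
        have hys : ys = [] := by simpa using hxy.symm
        subst hys
        simp [V_prod, E_prod, pairB, PySem.List.slice_from_one]
      | cons x xs' =>
        cases ys with
        | nil => simp at hxy
        | cons y ys' =>
          have hxy' : xs'.length = ys'.length := by simpa using hxy
          have ihv := ih (y :: ys') (by simpa using hxy) (by simp)
          rw [pairB_snoc x v y e xs' ys' hxy', ← ihv]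
          rw [V_prod, E_prod]
          have h2 : (y :: ys' ++ [e]).length ≠ 1 := by simp
          simp only [h2, if_false, and_false, PySem.List.slice_to_neg_one]
          rw [if_neg (show ¬ (x :: xs' ++ [v] = []) by simp)]
          have hdV : (x :: xs' ++ [v]).dropLast = x :: xs' := by
            simpa using List.dropLast_concat (l₁ := x :: xs') (b := v)
          have hdE : (y :: ys' ++ [e]).dropLast = y :: ys' := by
            simpa using List.dropLast_concat (l₁ := y :: ys') (b := e)
          have hgV : PySem.List.pyGet? (x :: xs' ++ [v]) (-1) = some v := by
            simpa using PySem.List.pyGet?_neg_one_append_singleton (xs := x :: xs') (x := v)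
          have hgE : PySem.List.pyGet? (y :: ys' ++ [e]) (-1) = some e := by
            simpa using PySem.List.pyGet?_neg_one_append_singleton (xs := y :: ys') (x := e)
          rw [hdV, hdE, hgV, hgE, if_neg (List.append_ne_nil_of_right_ne_nil _ (by simp))]
          simp only [Option.getD_some, stepB, Prod.mk.injEq]
          exact ⟨by ring, trivial⟩

-- ===== VERDICT (by name: the statement is the Claim_ definition above) =====
theorem V_prod_spec : Claim_equal_V_prod := by
  intro lV lE _ hpre
  unfold Spec_V_prod
  rw [alt_eq_pairB, ← main_invariant lV lE hpre.1 hpre.2]
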